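-- pv_equiv track=rewrite | github.com/Lassilanius/AoC-2021 | Day_25/solution.py | solve
-- ===== SOURCE A (Python) =====
-- def solve(grid):
--     M, N = len(grid), len(grid[0])
--     hs = {(i, j) for i, row in enumerate(grid) for j, x in enumerate(row) if x == '>'}
--     vs = {(i, j) for i, row in enumerate(grid) for j, x in enumerate(row) if x == 'v'}
--     it = 0
--
--     while True:
--         it += 1
--         toMove = []
--
--         for i, j in hs:
--             k = (j + 1) % N
--             if grid[i][k] == '.':
--                 toMove.append((i, j, k))
--
--         changed = bool(toMove)
--         for i, j, k in toMove:
--             grid[i][j] = '.'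
--             grid[i][k] = '>'
--             hs.remove((i, j))
--             hs.add((i, k))
--
--         toMove = []
--         for i, j in vs:
--             k = (i + 1) % M
--             if grid[k][j] == '.':
--                 toMove.append((i, j, k))
--
--         changed = changed or bool(toMove)
--         for i, j, k in toMove:
--             grid[i][j] = '.'
--             grid[k][j] = 'v'
--             vs.remove((i, j))
--             vs.add((k, j))
--
--         if not changed:
--             return it
-- ===== SOURCE B (Python) =====
-- # Functional re-implementation: no position sets, no collect-then-apply move lists;
-- # each step builds fresh east/south grids by a direct scan writing into a copy.
-- # NOTE: A mutates its grid argument in place; B does not -- equivalence is about the return value.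
-- def solve(grid):
--     M, N = len(grid), len(grid[0])
--     cur = grid
--     steps = 0
--     while True:
--         steps += 1
--         moved = False
--         east = [list(row) for row in cur]
--         for i, row in enumerate(cur):
--             for j, c in enumerate(row):
--                 if c == '>' and row[(j + 1) % N] == '.':
--                     east[i][j] = '.'
--                     east[i][(j + 1) % N] = '>'
--                     moved = True
--         south = [list(row) for row in east]
--         for i, row in enumerate(east):
--             for j, c in enumerate(row):
--                 if c == 'v' and east[(i + 1) % M][j] == '.':
--                     south[i][j] = '.'
--                     south[(i + 1) % M][j] = 'v'
--                     moved = True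
--         if not moved:
--             return steps
--         cur = south
-- ===== Notes on version B (the rewrite author's own statement) =====
-- stated objective: simpler
-- what changed: Dropped A's incrementally-maintained hs/vs position sets and its collect-then-apply toMove lists; B recomputes each step functionally, scanning the grid and writing moves directly into a fresh copy (east grid, then south grid) with a moved flag; B does not mutate the caller's grid (return-value equivalence).
-- outside the precondition, e.g. on solve([['x', '>'], ['y']]): A returns 1, B returns 1
import Mathlib
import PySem

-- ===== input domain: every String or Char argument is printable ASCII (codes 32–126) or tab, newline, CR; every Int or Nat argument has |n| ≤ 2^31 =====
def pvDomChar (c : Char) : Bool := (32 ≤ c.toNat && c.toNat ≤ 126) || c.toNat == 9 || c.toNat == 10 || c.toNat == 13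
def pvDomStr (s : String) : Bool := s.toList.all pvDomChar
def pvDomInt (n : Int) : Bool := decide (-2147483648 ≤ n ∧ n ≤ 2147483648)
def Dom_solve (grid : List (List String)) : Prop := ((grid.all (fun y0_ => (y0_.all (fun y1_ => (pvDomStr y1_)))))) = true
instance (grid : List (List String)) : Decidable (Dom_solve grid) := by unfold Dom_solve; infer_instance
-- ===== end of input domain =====

-- B rebuilds each step functionally (a direct scan writing moves into fresh east/south grids) instead of
-- A's incrementally maintained hs/vs position sets with collect-then-apply toMove lists; return-value
-- equivalence only: A mutates its grid argument in place, B does not.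

-- ===== PORT A =====
-- shared total indexing helpers (grid[i][j] read/write; exact where indices are in range, which Pre_ guarantees)
def pvCell (g : List (List String)) (p : Nat × Nat) : String := (g.getD p.1 []).getD p.2 ""

def pvGset (g : List (List String)) (p : Nat × Nat) (x : String) : List (List String) :=
  g.set p.1 ((g.getD p.1 []).set p.2 x)

-- {(i, j) for i, row in enumerate(grid) for j, x in enumerate(row) if x == sym}  (Nat indices; Python's indices here are the same non-negative ints)
def pvPosList (grid : List (List String)) (sym : String) : List (Nat × Nat) :=
  grid.zipIdx.flatMap (fun ri => (ri.1.zipIdx.filter (fun cj => cj.1 == sym)).map (fun cj => (ri.2, cj.2)))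

-- for i, j in hs: k = (j+1) % N; if grid[i][k] == '.': toMove.append((i, j, k))
def pvCollectE (N : Nat) (g : List (List String)) (hs : PySem.Set (Nat × Nat)) : List (Nat × Nat × Nat) :=
  hs.foldl (fun tm p => if pvCell g (p.1, (p.2 + 1) % N) == "." then tm ++ [(p.1, p.2, (p.2 + 1) % N)] else tm) []

-- for i, j in vs: k = (i+1) % M; if grid[k][j] == '.': toMove.append((i, j, k))
def pvCollectS (M : Nat) (g : List (List String)) (vs : PySem.Set (Nat × Nat)) : List (Nat × Nat × Nat) :=
  vs.foldl (fun tm p => if pvCell g ((p.1 + 1) % M, p.2) == "." then tm ++ [(p.1, p.2, (p.1 + 1) % M)] else tm) []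

-- hs.remove((i,j)) — the KeyError case is unreachable: the removed element was collected from hs
def pvSetRemove (s : PySem.Set (Nat × Nat)) (x : Nat × Nat) : PySem.Set (Nat × Nat) :=
  (PySem.Set.remove? s x).getD s

-- for i, j, k in toMove: grid[i][j]='.'; grid[i][k]='>'; hs.remove((i,j)); hs.add((i,k))
def pvApplyE (st : List (List String) × PySem.Set (Nat × Nat)) (tm : List (Nat × Nat × Nat)) :
    List (List String) × PySem.Set (Nat × Nat) :=
  tm.foldl (fun st m =>
    (pvGset (pvGset st.1 (m.1, m.2.1) ".") (m.1, m.2.2) ">",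
     PySem.Set.add (pvSetRemove st.2 (m.1, m.2.1)) (m.1, m.2.2))) st

-- for i, j, k in toMove: grid[i][j]='.'; grid[k][j]='v'; vs.remove((i,j)); vs.add((k,j))
def pvApplyS (st : List (List String) × PySem.Set (Nat × Nat)) (tm : List (Nat × Nat × Nat)) :
    List (List String) × PySem.Set (Nat × Nat) :=
  tm.foldl (fun st m =>
    (pvGset (pvGset st.1 (m.1, m.2.1) ".") (m.2.2, m.2.1) "v",
     PySem.Set.add (pvSetRemove st.2 (m.1, m.2.1)) (m.2.2, m.2.1))) st

-- fuel for Python's 'while True': every cell only ever holds its original value or '.', '>', 'v', so there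
-- are at most 4^(M*N) distinct grid states; a run that returns never repeats a state (the step function is
-- deterministic), hence performs at most 4^(M*N)+1 iterations, and this fuel is never exhausted where the
-- Python returns.  On grids that never reach a steady state the Python loops forever (it returns nothing);
-- both fuel-bounded ports return 0 there — no claim is made about the Pythons on such grids.
def pvFuel (grid : List (List String)) : Nat :=
  4 ^ (grid.length * (grid.headD []).length) + 2

def pvRunA (N M : Nat) : Nat → Int → List (List String) → PySem.Set (Nat × Nat) → PySem.Set (Nat × Nat) → Int
  | 0, _, _, _, _ => 0
  | fuel + 1, it, grid, hs, vs =>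
    let it' := it + 1
    let tmE := pvCollectE N grid hs
    let stE := pvApplyE (grid, hs) tmE
    let tmS := pvCollectS M stE.1 vs
    let stS := pvApplyS (stE.1, vs) tmS
    if !tmE.isEmpty || !tmS.isEmpty then pvRunA N M fuel it' stS.1 stE.2 stS.2 else it'

def solve (grid : List (List String)) : Int :=
  pvRunA (grid.headD []).length grid.length (pvFuel grid) 0 grid
    (PySem.Set.ofList (pvPosList grid ">")) (PySem.Set.ofList (pvPosList grid "v"))

-- ===== PORT B =====
-- east = copy of cur; for i,row in enumerate(cur): for j,c in enumerate(row):
--   if c == '>' and row[(j+1)%N] == '.': east[i][j]='.'; east[i][(j+1)%N]='>'; moved = True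
def pvEastPhase (N : Nat) (cur : List (List String)) : List (List String) × Bool :=
  cur.zipIdx.foldl (fun st ri =>
    ri.1.zipIdx.foldl (fun st cj =>
      if cj.1 == ">" && ri.1.getD ((cj.2 + 1) % N) "" == "." then
        (pvGset (pvGset st.1 (ri.2, cj.2) ".") (ri.2, (cj.2 + 1) % N) ">", true)
      else st) st) (cur, false)

-- south = copy of east; for i,row in enumerate(east): for j,c in enumerate(row):
--   if c == 'v' and east[(i+1)%M][j] == '.': south[i][j]='.'; south[(i+1)%M][j]='v'; moved = True
def pvSouthPhase (M : Nat) (east : List (List String)) (moved0 : Bool) : List (List String) × Bool :=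
  east.zipIdx.foldl (fun st ri =>
    ri.1.zipIdx.foldl (fun st cj =>
      if cj.1 == "v" && pvCell east ((ri.2 + 1) % M, cj.2) == "." then
        (pvGset (pvGset st.1 (ri.2, cj.2) ".") ((ri.2 + 1) % M, cj.2) "v", true)
      else st) st) (east, moved0)

def pvRunB (N M : Nat) : Nat → Int → List (List String) → Int
  | 0, _, _ => 0
  | fuel + 1, it, cur =>
    let it' := it + 1
    let e := pvEastPhase N cur
    let s := pvSouthPhase M e.1 e.2
    if s.2 then pvRunB N M fuel it' s.1 else it'

def solve_alt (grid : List (List String)) : Int :=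
  pvRunB (grid.headD []).length grid.length (pvFuel grid) 0 grid

-- ===== PRECONDITION & SPEC =====
def pvRectN (N : Nat) (g : List (List String)) : Prop := ∀ row ∈ g, row.length = N

-- Pre_ excludes the empty grid (grid[0] raises IndexError) and ragged grids that contain a cucumber cell
-- '>'/'v', where A's modular indexing into rows of unequal length can raise IndexError (a few such ragged
-- grids happen to keep every index in range and return, e.g. [['x','>'],['y']]).
def Pre_solve (grid : List (List String)) : Prop :=
  grid ≠ [] ∧
    ((∀ row ∈ grid, ">" ∉ row ∧ "v" ∉ row) ∨ pvRectN (grid.headD []).length grid)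

instance (grid : List (List String)) : Decidable (Pre_solve grid) := by
  unfold Pre_solve pvRectN; infer_instance

def pvWitness_solve : List (List String) :=
  [[">", ".", "#"], ["v", ".", "#"], ["#", "#", "#"]]

def Spec_solve (grid : List (List String)) (out : Int) : Prop := out = solve_alt grid
instance (grid : List (List String)) (out : Int) : Decidable (Spec_solve grid out) := by unfold Spec_solve; infer_instance

-- ===== CLAIM (what is proved, stated in full; the proofs are below) =====
def Claim_equal_solve : Prop := ∀ (grid : List (List String)), Dom_solve grid → Pre_solve grid → Spec_solve grid (solve grid)

-- ===== LEMMAS AND PROOFS =====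
def pvSh (M N : Nat) (g : List (List String)) : Prop :=
  g.length = M ∧ ∀ i, (h : i < g.length) → g[i].length = N

theorem pvGetD_set {α : Type} (l : List α) (i : Nat) (r : α) (j : Nat) (d : α) :
    (l.set i r).getD j d = if j = i ∧ i < l.length then r else l.getD j d := by
  by_cases hj : j < l.length
  · rw [List.getD_eq_getElem _ _ (by simpa using hj), List.getElem_set, List.getD_eq_getElem _ _ hj]
    by_cases hij : i = j
    · subst hij; simp [hj]
    · have hn : ¬(j = i ∧ i < l.length) := fun ⟨e, _⟩ => hij e.symm
      rw [if_neg hij, if_neg hn]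
  · rw [List.getD_eq_default _ _ (by simpa using hj), List.getD_eq_default _ _ (by omega)]
    have hn : ¬(j = i ∧ i < l.length) := by rintro ⟨rfl, h⟩; omega
    rw [if_neg hn]

theorem pvSh_gset {M N : Nat} {g : List (List String)} (sh : pvSh M N g) (p : Nat × Nat) (x : String) :
    pvSh M N (pvGset g p x) := by
  obtain ⟨h1, h2⟩ := sh
  refine ⟨by simp [pvGset, h1], ?_⟩
  intro i hi
  have hi' : i < g.length := by simpa [pvGset] using hi
  show (pvGset g p x)[i].length = N
  simp only [pvGset]
  rw [List.getElem_set]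
  split
  · next heq =>
    subst heq
    rw [List.length_set, List.getD_eq_getElem _ _ hi']
    exact h2 _ hi'
  · exact h2 i hi'

theorem pvCell_gset {M N : Nat} {g : List (List String)} (sh : pvSh M N g)
    {p : Nat × Nat} (hp1 : p.1 < g.length) (hp2 : p.2 < N) (x : String) (q : Nat × Nat) :
    pvCell (pvGset g p x) q = if q = p then x else pvCell g q := by
  obtain ⟨h1, h2⟩ := sh
  obtain ⟨pi, pj⟩ := p
  obtain ⟨qi, qj⟩ := q
  simp only at hp1 hp2
  have hrowlen : (g.getD pi []).length = N := by
    rw [List.getD_eq_getElem _ _ hp1]; exact h2 _ hp1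
  simp only [pvCell, pvGset]
  rw [pvGetD_set]
  by_cases hqi : qi = pi
  · subst hqi
    rw [if_pos ⟨rfl, hp1⟩, pvGetD_set]
    by_cases hqj : qj = pj
    · subst hqj
      rw [if_pos ⟨rfl, by omega⟩, if_pos rfl]
    · have hn : ¬(qj = pj ∧ pj < (g.getD qi []).length) := fun ⟨e, _⟩ => hqj e
      have hn2 : ¬((qi, qj) = (qi, pj)) := by simp [hqj]
      rw [if_neg hn, if_neg hn2]
  · have hn : ¬(qi = pi ∧ pi < g.length) := fun ⟨e, _⟩ => hqi e
    have hn2 : ¬((qi, qj) = (pi, pj)) := by simp [hqi]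
    rw [if_neg hn, if_neg hn2]

theorem pvCell_range {M N : Nat} {g : List (List String)} (sh : pvSh M N g)
    {q : Nat × Nat} {s : String} (hs : pvCell g q = s) (hne : s ≠ "") :
    q.1 < g.length ∧ q.2 < N := by
  obtain ⟨h1, h2⟩ := sh
  obtain ⟨qi, qj⟩ := q
  simp only [pvCell] at hs
  by_cases hqi : qi < g.length
  · have hrow : (g.getD qi []).length = N := by
      rw [List.getD_eq_getElem _ _ hqi]; exact h2 _ hqi
    by_cases hqj : qj < (g.getD qi []).length
    · exact ⟨hqi, by omega⟩
    · rw [List.getD_eq_default _ _ (by omega)] at hs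
      exact absurd hs.symm (by simpa using hne)
  · rw [show g.getD qi [] = [] from List.getD_eq_default _ _ (by omega)] at hs
    simp only [List.getD_nil] at hs
    exact absurd hs.symm (by simpa using hne)

theorem pvGrid_ext {M N : Nat} {g1 g2 : List (List String)} (sh1 : pvSh M N g1) (sh2 : pvSh M N g2)
    (h : ∀ q, pvCell g1 q = pvCell g2 q) : g1 = g2 := by
  obtain ⟨l1, r1⟩ := sh1
  obtain ⟨l2, r2⟩ := sh2
  refine List.ext_getElem (by omega) ?_
  intro i hi1 hi2
  refine List.ext_getElem (by rw [r1 i hi1, r2 i hi2]) ?_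
  intro j hj1 hj2
  have := h (i, j)
  simp only [pvCell] at this
  rwa [List.getD_eq_getElem _ _ hi1, List.getD_eq_getElem _ _ hi2,
    List.getD_eq_getElem _ _ hj1, List.getD_eq_getElem _ _ hj2] at this

def pvApply (sym : String) (g : List (List String)) (ms : List ((Nat × Nat) × (Nat × Nat))) :
    List (List String) :=
  ms.foldl (fun g m => pvGset (pvGset g m.1 ".") m.2 sym) g

def pvMovesOK (sym : String) (N : Nat) (g : List (List String))
    (ms : List ((Nat × Nat) × (Nat × Nat))) : Prop :=
  (ms.map Prod.fst).Nodup ∧ (ms.map Prod.snd).Nodup ∧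
  ∀ m ∈ ms, pvCell g m.1 = sym ∧ pvCell g m.2 = "." ∧
            m.1.1 < g.length ∧ m.1.2 < N ∧ m.2.1 < g.length ∧ m.2.2 < N

theorem pvSh_pvApply {M N : Nat} {g : List (List String)} (sh : pvSh M N g)
    (sym : String) (ms : List ((Nat × Nat) × (Nat × Nat))) : pvSh M N (pvApply sym g ms) := by
  induction ms generalizing g with
  | nil => exact sh
  | cons m ms ih => exact ih (pvSh_gset (pvSh_gset sh m.1 ".") m.2 sym)

theorem pvCell_pvApply {M N : Nat} {sym : String} (hsym : sym ≠ "." ∧ sym ≠ "")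
    {g : List (List String)} {ms : List ((Nat × Nat) × (Nat × Nat))}
    (sh : pvSh M N g) (ok : pvMovesOK sym N g ms) (q : Nat × Nat) :
    pvCell (pvApply sym g ms) q =
      if q ∈ ms.map Prod.fst then "." else if q ∈ ms.map Prod.snd then sym else pvCell g q := by
  induction ms generalizing g with
  | nil => simp [pvApply]
  | cons m ms ih =>
    obtain ⟨nd1, nd2, hall⟩ := ok
    obtain ⟨hm1, hm2, hr1, hr2, hr3, hr4⟩ := hall m (List.mem_cons_self ..)
    have sh1 : pvSh M N (pvGset g m.1 ".") := pvSh_gset sh m.1 "."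
    have sh2 : pvSh M N (pvGset (pvGset g m.1 ".") m.2 sym) := pvSh_gset sh1 m.2 sym
    have hmne : m.1 ≠ m.2 := by
      intro h; rw [h, hm2] at hm1; exact hsym.1 hm1.symm
    have hcell1 : ∀ r, pvCell (pvGset (pvGset g m.1 ".") m.2 sym) r =
        if r = m.2 then sym else if r = m.1 then "." else pvCell g r := by
      intro r
      rw [pvCell_gset sh1 (by simpa [pvGset] using hr3) hr4 sym r]
      by_cases h2 : r = m.2
      · simp [h2]
      · rw [if_neg h2, pvCell_gset sh hr1 hr2 "." r, if_neg h2]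
    have hsrcs : m.1 ∉ ms.map Prod.fst := by simpa using (List.nodup_cons.mp nd1).1
    have htgts : m.2 ∉ ms.map Prod.snd := by simpa using (List.nodup_cons.mp nd2).1
    have hsrc_tgt : ∀ m' ∈ ms, m.1 ≠ m'.2 := by
      intro m' hm' h
      have := (hall m' (List.mem_cons_of_mem _ hm')).2.1
      rw [← h, hm1] at this; exact hsym.1 this
    have htgt_src : ∀ m' ∈ ms, m.2 ≠ m'.1 := by
      intro m' hm' h
      have := (hall m' (List.mem_cons_of_mem _ hm')).1
      rw [← h, hm2] at this; exact hsym.1 this.symm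
    have ok' : pvMovesOK sym N (pvGset (pvGset g m.1 ".") m.2 sym) ms := by
      refine ⟨(List.nodup_cons.mp nd1).2, (List.nodup_cons.mp nd2).2, ?_⟩
      intro m' hm'
      obtain ⟨c1, c2, d1, d2, d3, d4⟩ := hall m' (List.mem_cons_of_mem _ hm')
      have hne1 : m'.1 ≠ m.2 := fun h => htgt_src m' hm' h.symm
      have hne2 : m'.1 ≠ m.1 := by
        intro h
        exact hsrcs (by simpa [← h] using List.mem_map_of_mem (f := Prod.fst) hm')
      have hne3 : m'.2 ≠ m.2 := by
        intro h
        exact htgts (by simpa [← h] using List.mem_map_of_mem (f := Prod.snd) hm')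
      have hne4 : m'.2 ≠ m.1 := fun h => hsrc_tgt m' hm' h.symm
      rw [hcell1 m'.1, if_neg hne1, if_neg hne2, hcell1 m'.2, if_neg hne3, if_neg hne4]
      exact ⟨c1, c2, by simpa [pvGset] using d1, d2, by simpa [pvGset] using d3, d4⟩
    have := ih sh2 ok'
    show pvCell (pvApply sym (pvGset (pvGset g m.1 ".") m.2 sym) ms) q = _
    rw [this]
    by_cases hq1 : q ∈ ms.map Prod.fst
    · rw [if_pos hq1]
      have : q ∈ (m :: ms).map Prod.fst := by simp [List.mem_map] at hq1 ⊢; tauto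
      rw [if_pos this]
    · rw [if_neg hq1]
      by_cases hq2 : q ∈ ms.map Prod.snd
      · rw [if_pos hq2]
        have hq2' : q ∈ (m :: ms).map Prod.snd := by simp [List.mem_map] at hq2 ⊢; tauto
        have hq1' : q ∉ (m :: ms).map Prod.fst := by
          simp only [List.map_cons, List.mem_cons]
          rintro (h | h)
          · obtain ⟨m', hm', he⟩ := List.mem_map.mp hq2
            exact hsrc_tgt m' hm' (he.trans h).symm
          · exact hq1 h
        rw [if_neg hq1', if_pos hq2']
      · rw [if_neg hq2, hcell1 q]
        by_cases h2 : q = m.2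
        · have t1 : q ∉ (m :: ms).map Prod.fst := by
            simp only [List.map_cons, List.mem_cons]
            rintro (h | h)
            · exact hmne ((h2.symm.trans h).symm)
            · obtain ⟨m', hm', he⟩ := List.mem_map.mp h
              exact htgt_src m' hm' (he.trans h2).symm
          have t2 : q ∈ (m :: ms).map Prod.snd := by rw [h2]; simp
          rw [if_pos h2, if_neg t1, if_pos t2]
        · rw [if_neg h2]
          by_cases h1 : q = m.1
          · have t1 : q ∈ (m :: ms).map Prod.fst := by rw [h1]; simp
            rw [if_pos h1, if_pos t1]
          · rw [if_neg h1]
            have t1 : q ∉ (m :: ms).map Prod.fst := by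
              simp only [List.map_cons, List.mem_cons]
              rintro (h | h)
              · exact h1 h
              · exact hq1 h
            have t2 : q ∉ (m :: ms).map Prod.snd := by
              simp only [List.map_cons, List.mem_cons]
              rintro (h | h)
              · exact h2 h
              · exact hq2 h
            rw [if_neg t1, if_neg t2]

theorem pvSetFold_char (l : List ((Nat × Nat) × (Nat × Nat))) :
    ∀ (s : PySem.Set (Nat × Nat)), s.Nodup → (l.map Prod.fst).Nodup → (l.map Prod.snd).Nodup →
    (∀ e ∈ l, e.1 ∈ s) → (∀ e ∈ l, e.2 ∉ s) →
    (l.foldl (fun s e => PySem.Set.add (pvSetRemove s e.1) e.2) s).Nodup ∧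
    ∀ q, q ∈ l.foldl (fun s e => PySem.Set.add (pvSetRemove s e.1) e.2) s ↔
      ((q ∈ s ∧ q ∉ l.map Prod.fst) ∨ q ∈ l.map Prod.snd) := by
  induction l with
  | nil => intro s hnd _ _ _ _; exact ⟨hnd, by simp⟩
  | cons e l ih =>
    intro s hnd nd1 nd2 hsub hout
    have he1 : e.1 ∈ s := hsub e (List.mem_cons_self ..)
    have hrem : pvSetRemove s e.1 = s.discard e.1 := by
      rw [pvSetRemove, PySem.Set.remove?_of_mem he1]; rfl
    have hnd1 : (s.discard e.1).Nodup := PySem.Set.nodup_discard _ _ hnd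
    have hs1nd : ((s.discard e.1).add e.2).Nodup := PySem.Set.nodup_add _ _ hnd1
    have hmem1 : ∀ q, q ∈ (s.discard e.1).add e.2 ↔ ((q ∈ s ∧ q ≠ e.1) ∨ q = e.2) := by
      intro q; rw [PySem.Set.mem_add, PySem.Set.mem_discard]
    have hsrcs : e.1 ∉ l.map Prod.fst := by simpa using (List.nodup_cons.mp nd1).1
    have htgts : e.2 ∉ l.map Prod.snd := by simpa using (List.nodup_cons.mp nd2).1
    have hsub' : ∀ e' ∈ l, e'.1 ∈ (s.discard e.1).add e.2 := by
      intro e' he'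
      rw [hmem1]
      left
      refine ⟨hsub e' (List.mem_cons_of_mem _ he'), ?_⟩
      intro h
      exact hsrcs (by simpa [← h] using List.mem_map_of_mem (f := Prod.fst) he')
    have hout' : ∀ e' ∈ l, e'.2 ∉ (s.discard e.1).add e.2 := by
      intro e' he' hcon
      rw [hmem1] at hcon
      rcases hcon with ⟨hin, _⟩ | heq
      · exact hout e' (List.mem_cons_of_mem _ he') hin
      · exact htgts (by simpa [← heq] using List.mem_map_of_mem (f := Prod.snd) he')
    obtain ⟨rnd, rmem⟩ := ih ((s.discard e.1).add e.2) hs1nd (List.nodup_cons.mp nd1).2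
      (List.nodup_cons.mp nd2).2 hsub' hout'
    have hstep : (e :: l).foldl (fun s e => PySem.Set.add (pvSetRemove s e.1) e.2) s
        = l.foldl (fun s e => PySem.Set.add (pvSetRemove s e.1) e.2) ((s.discard e.1).add e.2) := by
      simp [List.foldl_cons, hrem]
    rw [hstep]
    refine ⟨rnd, ?_⟩
    intro q
    rw [rmem q, hmem1 q]
    have he2s : e.2 ∉ s := hout e (List.mem_cons_self ..)
    constructor
    · rintro (⟨hq1, hnotin⟩ | hq)
      · rcases hq1 with ⟨hqs, hqne⟩ | hqe2
        · left
          refine ⟨hqs, ?_⟩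
          simp only [List.map_cons, List.mem_cons]
          rintro (h | h)
          · exact hqne h
          · exact hnotin h
        · right; simp only [List.map_cons, List.mem_cons]; left; exact hqe2
      · right; simp only [List.map_cons, List.mem_cons]; right; exact hq
    · rintro (⟨hqs, hnotin⟩ | hq)
      · simp only [List.map_cons, List.mem_cons] at hnotin
        push Not at hnotin
        left
        exact ⟨Or.inl ⟨hqs, hnotin.1⟩, hnotin.2⟩
      · simp only [List.map_cons, List.mem_cons] at hq
        rcases hq with hq | hq
        · left
          refine ⟨Or.inr hq, ?_⟩
          intro h
          obtain ⟨e', he', hee⟩ := List.mem_map.mp h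
          exact he2s (by rw [← hq, ← hee]; exact hsub e' (List.mem_cons_of_mem _ he'))
        · right; exact hq

theorem pvInner_fold (sym : String) {δ : Type} (P : δ → Bool) (mv : δ → (Nat × Nat) × (Nat × Nat))
    (L : List δ) : ∀ (st : List (List String) × Bool),
    L.foldl (fun st cj => if P cj then (pvGset (pvGset st.1 (mv cj).1 ".") (mv cj).2 sym, true) else st) st
      = (pvApply sym st.1 ((L.filter P).map mv), st.2 || !((L.filter P).map mv).isEmpty) := by
  induction L with
  | nil => intro st; simp [pvApply]
  | cons c L ih =>
    intro st
    by_cases hc : P c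
    · rw [List.foldl_cons, if_pos hc, ih]
      simp [List.filter_cons, hc, pvApply]
    · rw [List.foldl_cons, if_neg hc, ih]
      simp [List.filter_cons, hc]

theorem pvApply_append (sym : String) (g : List (List String)) (l1 l2 : List ((Nat × Nat) × (Nat × Nat))) :
    pvApply sym g (l1 ++ l2) = pvApply sym (pvApply sym g l1) l2 := by
  simp [pvApply, List.foldl_append]

theorem pvOuter_fold (sym : String) {γ : Type} (F : γ → List ((Nat × Nat) × (Nat × Nat)))
    (L : List γ) : ∀ (st : List (List String) × Bool),
    L.foldl (fun st ri => (pvApply sym st.1 (F ri), st.2 || !(F ri).isEmpty)) st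
      = (pvApply sym st.1 (L.flatMap F), st.2 || !(L.flatMap F).isEmpty) := by
  induction L with
  | nil => intro st; simp [pvApply]
  | cons r L ih =>
    intro st
    rw [List.foldl_cons, ih]
    simp only [List.flatMap_cons, pvApply_append]
    refine congrArg _ ?_
    cases hF : (F r).isEmpty <;> cases hL : (List.flatMap F L).isEmpty <;>
      simp_all [List.isEmpty_iff, Bool.or_assoc]

theorem pvFlatMap_sublist {γ δ : Type} (F G : γ → List δ) (L : List γ)
    (h : ∀ x ∈ L, (F x).Sublist (G x)) : (L.flatMap F).Sublist (L.flatMap G) := by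
  induction L with
  | nil => simp
  | cons r L ih =>
    simp only [List.flatMap_cons]
    exact List.Sublist.append (h r (List.mem_cons_self ..))
      (ih fun x hx => h x (List.mem_cons_of_mem _ hx))

def pvMvPairE (N : Nat) (ri : List String × Nat) (cj : String × Nat) : (Nat × Nat) × (Nat × Nat) :=
  ((ri.2, cj.2), (ri.2, (cj.2 + 1) % N))

def pvMvPairS (M : Nat) (ri : List String × Nat) (cj : String × Nat) : (Nat × Nat) × (Nat × Nat) :=
  ((ri.2, cj.2), ((ri.2 + 1) % M, cj.2))

def pvBMovesE (N : Nat) (cur : List (List String)) : List ((Nat × Nat) × (Nat × Nat)) :=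
  cur.zipIdx.flatMap (fun ri =>
    (ri.1.zipIdx.filter (fun cj => cj.1 == ">" && ri.1.getD ((cj.2 + 1) % N) "" == ".")).map (pvMvPairE N ri))

def pvBMovesS (M : Nat) (east : List (List String)) : List ((Nat × Nat) × (Nat × Nat)) :=
  east.zipIdx.flatMap (fun ri =>
    (ri.1.zipIdx.filter (fun cj => cj.1 == "v" && pvCell east ((ri.2 + 1) % M, cj.2) == ".")).map (pvMvPairS M ri))

def pvPairsA (N : Nat) (g : List (List String)) (hs : PySem.Set (Nat × Nat)) : List ((Nat × Nat) × (Nat × Nat)) :=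
  (hs.filter (fun p => pvCell g (p.1, (p.2 + 1) % N) == ".")).map (fun p => ((p.1, p.2), (p.1, (p.2 + 1) % N)))

def pvPairsAS (M : Nat) (g : List (List String)) (vs : PySem.Set (Nat × Nat)) : List ((Nat × Nat) × (Nat × Nat)) :=
  (vs.filter (fun p => pvCell g ((p.1 + 1) % M, p.2) == ".")).map (fun p => ((p.1, p.2), ((p.1 + 1) % M, p.2)))

theorem pvEastPhase_eq (N : Nat) (cur : List (List String)) :
    pvEastPhase N cur = (pvApply ">" cur (pvBMovesE N cur), !(pvBMovesE N cur).isEmpty) := by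
  unfold pvEastPhase pvBMovesE
  have hbody : (fun (st : List (List String) × Bool) (ri : List String × Nat) =>
      ri.1.zipIdx.foldl (fun st cj =>
        if cj.1 == ">" && ri.1.getD ((cj.2 + 1) % N) "" == "." then
          (pvGset (pvGset st.1 (ri.2, cj.2) ".") (ri.2, (cj.2 + 1) % N) ">", true)
        else st) st)
      = (fun st ri => (pvApply ">" st.1
          ((ri.1.zipIdx.filter (fun cj => cj.1 == ">" && ri.1.getD ((cj.2 + 1) % N) "" == ".")).map (pvMvPairE N ri)),
          st.2 || !((ri.1.zipIdx.filter (fun cj => cj.1 == ">" && ri.1.getD ((cj.2 + 1) % N) "" == ".")).map (pvMvPairE N ri)).isEmpty)) := by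
    funext st ri
    exact pvInner_fold ">" _ (pvMvPairE N ri) _ st
  rw [hbody, pvOuter_fold]
  simp

theorem pvSouthPhase_eq (M : Nat) (east : List (List String)) (b0 : Bool) :
    pvSouthPhase M east b0 = (pvApply "v" east (pvBMovesS M east), b0 || !(pvBMovesS M east).isEmpty) := by
  unfold pvSouthPhase pvBMovesS
  have hbody : (fun (st : List (List String) × Bool) (ri : List String × Nat) =>
      ri.1.zipIdx.foldl (fun st cj =>
        if cj.1 == "v" && pvCell east ((ri.2 + 1) % M, cj.2) == "." then
          (pvGset (pvGset st.1 (ri.2, cj.2) ".") ((ri.2 + 1) % M, cj.2) "v", true)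
        else st) st)
      = (fun st ri => (pvApply "v" st.1
          ((ri.1.zipIdx.filter (fun cj => cj.1 == "v" && pvCell east ((ri.2 + 1) % M, cj.2) == ".")).map (pvMvPairS M ri)),
          st.2 || !((ri.1.zipIdx.filter (fun cj => cj.1 == "v" && pvCell east ((ri.2 + 1) % M, cj.2) == ".")).map (pvMvPairS M ri)).isEmpty)) := by
    funext st ri
    exact pvInner_fold "v" _ (pvMvPairS M ri) _ st
  rw [hbody, pvOuter_fold]

theorem pvCollectE_eq (N : Nat) (g : List (List String)) (hs : PySem.Set (Nat × Nat)) :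
    pvCollectE N g hs = (hs.filter (fun p => pvCell g (p.1, (p.2 + 1) % N) == ".")).map
      (fun p => (p.1, p.2, (p.2 + 1) % N)) := by
  unfold pvCollectE
  rw [PySem.List.foldl_append_if]
  simp

theorem pvCollectS_eq (M : Nat) (g : List (List String)) (vs : PySem.Set (Nat × Nat)) :
    pvCollectS M g vs = (vs.filter (fun p => pvCell g ((p.1 + 1) % M, p.2) == ".")).map
      (fun p => (p.1, p.2, (p.1 + 1) % M)) := by
  unfold pvCollectS
  rw [PySem.List.foldl_append_if]
  simp

theorem pvApplyE_eq (g : List (List String)) (hs : PySem.Set (Nat × Nat)) (tm : List (Nat × Nat × Nat)) :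
    pvApplyE (g, hs) tm =
      (pvApply ">" g (tm.map (fun m => ((m.1, m.2.1), (m.1, m.2.2)))),
       (tm.map (fun m => ((m.1, m.2.1), (m.1, m.2.2)))).foldl
         (fun s e => PySem.Set.add (pvSetRemove s e.1) e.2) hs) := by
  induction tm generalizing g hs with
  | nil => rfl
  | cons m tm ih =>
    show pvApplyE (pvGset (pvGset g (m.1, m.2.1) ".") (m.1, m.2.2) ">",
      PySem.Set.add (pvSetRemove hs (m.1, m.2.1)) (m.1, m.2.2)) tm = _
    rw [ih]
    rfl

theorem pvApplyS_eq (g : List (List String)) (vs : PySem.Set (Nat × Nat)) (tm : List (Nat × Nat × Nat)) :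
    pvApplyS (g, vs) tm =
      (pvApply "v" g (tm.map (fun m => ((m.1, m.2.1), (m.2.2, m.2.1)))),
       (tm.map (fun m => ((m.1, m.2.1), (m.2.2, m.2.1)))).foldl
         (fun s e => PySem.Set.add (pvSetRemove s e.1) e.2) vs) := by
  induction tm generalizing g vs with
  | nil => rfl
  | cons m tm ih =>
    show pvApplyS (pvGset (pvGset g (m.1, m.2.1) ".") (m.2.2, m.2.1) "v",
      PySem.Set.add (pvSetRemove vs (m.1, m.2.1)) (m.2.2, m.2.1)) tm = _
    rw [ih]
    rfl

theorem pvCollectE_pairs (N : Nat) (g : List (List String)) (hs : PySem.Set (Nat × Nat)) :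
    (pvCollectE N g hs).map (fun m => ((m.1, m.2.1), (m.1, m.2.2))) = pvPairsA N g hs := by
  rw [pvCollectE_eq, List.map_map]; rfl

theorem pvCollectS_pairs (M : Nat) (g : List (List String)) (vs : PySem.Set (Nat × Nat)) :
    (pvCollectS M g vs).map (fun m => ((m.1, m.2.1), (m.2.2, m.2.1))) = pvPairsAS M g vs := by
  rw [pvCollectS_eq, List.map_map]; rfl

def pvMvE (N : Nat) (g : List (List String)) (e : (Nat × Nat) × (Nat × Nat)) : Prop :=
  ∃ i j, e = ((i, j), (i, (j + 1) % N)) ∧ pvCell g (i, j) = ">" ∧ pvCell g (i, (j + 1) % N) = "."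

def pvMvS (M : Nat) (g : List (List String)) (e : (Nat × Nat) × (Nat × Nat)) : Prop :=
  ∃ i j, e = ((i, j), ((i + 1) % M, j)) ∧ pvCell g (i, j) = "v" ∧ pvCell g ((i + 1) % M, j) = "."

theorem pvRow_of_zipIdx {cur : List (List String)} {ri : List String × Nat}
    (h : ri ∈ cur.zipIdx) : cur[ri.2]? = some ri.1 ∧ ∀ x, pvCell cur (ri.2, x) = ri.1.getD x "" := by
  obtain ⟨row, i⟩ := ri
  have h1 := List.mk_mem_zipIdx_iff_getElem?.mp h
  refine ⟨h1, fun x => ?_⟩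
  simp only [pvCell, List.getD_eq_getElem?_getD, h1]
  rfl

theorem pvMem_bMovesE {M N : Nat} {cur : List (List String)} (sh : pvSh M N cur)
    (e : (Nat × Nat) × (Nat × Nat)) : e ∈ pvBMovesE N cur ↔ pvMvE N cur e := by
  unfold pvBMovesE
  rw [List.mem_flatMap]
  constructor
  · rintro ⟨ri, hri, hmem⟩
    obtain ⟨hrow, hcell⟩ := pvRow_of_zipIdx hri
    obtain ⟨cj, hcj, rfl⟩ := List.mem_map.mp hmem
    obtain ⟨hcjmem, hcond⟩ := List.mem_filter.mp hcj
    obtain ⟨hc, hd⟩ := Bool.and_eq_true_iff.mp hcond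
    have hc' : cj.1 = ">" := by simpa using hc
    have hd' : ri.1.getD ((cj.2 + 1) % N) "" = "." := by simpa using hd
    refine ⟨ri.2, cj.2, rfl, ?_, ?_⟩
    · rw [hcell cj.2]
      obtain ⟨c, j⟩ := cj
      have := List.mk_mem_zipIdx_iff_getElem?.mp hcjmem
      simp only [List.getD_eq_getElem?_getD, this]
      exact hc'
    · rw [hcell _]; exact hd'
  · rintro ⟨i, j, rfl, hsrc, htgt⟩
    have hr1 := pvCell_range sh hsrc (by decide)
    have hi : i < cur.length := hr1.1
    have hrowlen : cur[i].length = N := sh.2 i hi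
    have hcell : ∀ x, pvCell cur (i, x) = cur[i].getD x "" := by
      intro x
      simp only [pvCell, List.getD_eq_getElem?_getD, List.getElem?_eq_getElem hi]
      rfl
    refine ⟨(cur[i], i), List.mk_mem_zipIdx_iff_getElem?.mpr (List.getElem?_eq_getElem hi), ?_⟩
    rw [List.mem_map]
    have hj : j < cur[i].length := by rw [hrowlen]; exact hr1.2
    refine ⟨(cur[i][j], j), ?_, ?_⟩
    · rw [List.mem_filter]
      refine ⟨List.mk_mem_zipIdx_iff_getElem?.mpr (List.getElem?_eq_getElem hj), ?_⟩
      rw [Bool.and_eq_true_iff]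
      constructor
      · have := hcell j
        rw [List.getD_eq_getElem _ _ hj] at this
        rw [← this, hsrc]
        rfl
      · have := hcell ((j + 1) % N)
        rw [← this]
        simpa using htgt
    · rfl

theorem pvMem_bMovesS {M N : Nat} {east : List (List String)} (sh : pvSh M N east)
    (e : (Nat × Nat) × (Nat × Nat)) : e ∈ pvBMovesS M east ↔ pvMvS M east e := by
  unfold pvBMovesS
  rw [List.mem_flatMap]
  constructor
  · rintro ⟨ri, hri, hmem⟩
    obtain ⟨hrow, hcell⟩ := pvRow_of_zipIdx hri
    obtain ⟨cj, hcj, rfl⟩ := List.mem_map.mp hmem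
    obtain ⟨hcjmem, hcond⟩ := List.mem_filter.mp hcj
    obtain ⟨hc, hd⟩ := Bool.and_eq_true_iff.mp hcond
    have hc' : cj.1 = "v" := by simpa using hc
    have hd' : pvCell east ((ri.2 + 1) % M, cj.2) = "." := by simpa using hd
    refine ⟨ri.2, cj.2, rfl, ?_, hd'⟩
    rw [hcell cj.2]
    obtain ⟨c, j⟩ := cj
    have := List.mk_mem_zipIdx_iff_getElem?.mp hcjmem
    simp only [List.getD_eq_getElem?_getD, this]
    exact hc'
  · rintro ⟨i, j, rfl, hsrc, htgt⟩
    have hr1 := pvCell_range sh hsrc (by decide)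
    have hi : i < east.length := hr1.1
    have hrowlen : east[i].length = N := sh.2 i hi
    have hcell : ∀ x, pvCell east (i, x) = east[i].getD x "" := by
      intro x
      simp only [pvCell, List.getD_eq_getElem?_getD, List.getElem?_eq_getElem hi]
      rfl
    refine ⟨(east[i], i), List.mk_mem_zipIdx_iff_getElem?.mpr (List.getElem?_eq_getElem hi), ?_⟩
    rw [List.mem_map]
    have hj : j < east[i].length := by rw [hrowlen]; exact hr1.2
    refine ⟨(east[i][j], j), ?_, ?_⟩
    · rw [List.mem_filter]
      refine ⟨List.mk_mem_zipIdx_iff_getElem?.mpr (List.getElem?_eq_getElem hj), ?_⟩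
      rw [Bool.and_eq_true_iff]
      constructor
      · have := hcell j
        rw [List.getD_eq_getElem _ _ hj] at this
        rw [← this, hsrc]
        rfl
      · simpa using htgt
    · rfl

theorem pvMem_pairsA {N : Nat} {g : List (List String)} {hs : PySem.Set (Nat × Nat)}
    (hinv : ∀ p, p ∈ hs ↔ pvCell g p = ">") (e : (Nat × Nat) × (Nat × Nat)) :
    e ∈ pvPairsA N g hs ↔ pvMvE N g e := by
  unfold pvPairsA
  rw [List.mem_map]
  constructor
  · rintro ⟨p, hp, rfl⟩
    obtain ⟨hpm, hcond⟩ := List.mem_filter.mp hp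
    exact ⟨p.1, p.2, rfl, (hinv p).mp hpm, by simpa using hcond⟩
  · rintro ⟨i, j, rfl, hsrc, htgt⟩
    refine ⟨(i, j), List.mem_filter.mpr ⟨(hinv (i, j)).mpr hsrc, by simpa using htgt⟩, rfl⟩

theorem pvMem_pairsAS {M : Nat} {g : List (List String)} {vs : PySem.Set (Nat × Nat)}
    (hinv : ∀ p, p ∈ vs ↔ pvCell g p = "v") (e : (Nat × Nat) × (Nat × Nat)) :
    e ∈ pvPairsAS M g vs ↔ pvMvS M g e := by
  unfold pvPairsAS
  rw [List.mem_map]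
  constructor
  · rintro ⟨p, hp, rfl⟩
    obtain ⟨hpm, hcond⟩ := List.mem_filter.mp hp
    exact ⟨p.1, p.2, rfl, (hinv p).mp hpm, by simpa using hcond⟩
  · rintro ⟨i, j, rfl, hsrc, htgt⟩
    refine ⟨(i, j), List.mem_filter.mpr ⟨(hinv (i, j)).mpr hsrc, by simpa using htgt⟩, rfl⟩

theorem pvModSucc_inj {N j1 j2 : Nat} (h1 : j1 < N) (h2 : j2 < N)
    (h : (j1 + 1) % N = (j2 + 1) % N) : j1 = j2 := by
  have m1 : (j1 + 1) % N = if j1 + 1 = N then 0 else j1 + 1 := by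
    split
    · next e => rw [e]; exact Nat.mod_self N
    · exact Nat.mod_eq_of_lt (by omega)
  have m2 : (j2 + 1) % N = if j2 + 1 = N then 0 else j2 + 1 := by
    split
    · next e => rw [e]; exact Nat.mod_self N
    · exact Nat.mod_eq_of_lt (by omega)
  rw [m1, m2] at h
  split_ifs at h <;> omega

theorem pvZipIdx_nodup {α : Type} (l : List α) : l.zipIdx.Nodup := by
  have h : (l.zipIdx.map Prod.snd).Nodup := by
    rw [List.zipIdx_map_snd]; exact List.nodup_range' 1
  exact List.Nodup.of_map _ h

theorem pvZipIdx_pairwise {α : Type} (l : List α) :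
    l.zipIdx.Pairwise (fun a b => a.2 < b.2) := by
  have h : (l.zipIdx.map Prod.snd).Pairwise (· < ·) := by
    rw [List.zipIdx_map_snd]; exact List.pairwise_lt_range' 1
  exact List.pairwise_map.mp h

theorem pvZipIdx_eq_of_snd {α : Type} {l : List α} {a b : α × Nat}
    (ha : a ∈ l.zipIdx) (hb : b ∈ l.zipIdx) (h : a.2 = b.2) : a = b := by
  obtain ⟨x, i⟩ := a
  obtain ⟨y, k⟩ := b
  simp only at h
  subst h
  have h1 := List.mk_mem_zipIdx_iff_getElem?.mp ha
  have h2 := List.mk_mem_zipIdx_iff_getElem?.mp hb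
  rw [h1] at h2
  simp [Option.some.inj h2]

theorem pvAllMoves_nodup {cur : List (List String)}
    (mv : (List String × Nat) → (String × Nat) → (Nat × Nat) × (Nat × Nat))
    (hsrc : ∀ ri cj, (mv ri cj).1 = (ri.2, cj.2)) :
    (cur.zipIdx.flatMap (fun ri => ri.1.zipIdx.map (mv ri))).Nodup := by
  rw [List.flatMap_def, List.nodup_flatten]
  constructor
  · intro l hl
    obtain ⟨ri, _, rfl⟩ := List.mem_map.mp hl
    refine List.Nodup.map_on ?_ (pvZipIdx_nodup _)
    intro x hx y hy hxy
    have : x.2 = y.2 := by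
      have := congrArg Prod.fst hxy
      rw [hsrc, hsrc] at this
      simpa using (congrArg Prod.snd this)
    exact pvZipIdx_eq_of_snd hx hy this
  · rw [List.pairwise_map]
    refine (pvZipIdx_pairwise cur).imp ?_
    intro a b hab
    intro x hxa hxb
    obtain ⟨ca, _, rfl⟩ := List.mem_map.mp hxa
    obtain ⟨cb, _, hcb⟩ := List.mem_map.mp hxb
    have h1 : (mv a ca).1.1 = a.2 := by rw [hsrc]
    have h2 : (mv b cb).1.1 = b.2 := by rw [hsrc]
    rw [hcb] at h2
    omega

theorem pvBMovesE_nodup {N : Nat} {cur : List (List String)} : (pvBMovesE N cur).Nodup := by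
  refine List.Nodup.sublist ?_ (pvAllMoves_nodup (cur := cur) (mv := pvMvPairE N) (fun _ _ => rfl))
  unfold pvBMovesE
  exact pvFlatMap_sublist _ _ _ (fun ri _ => List.Sublist.map _ List.filter_sublist)

theorem pvBMovesS_nodup {M : Nat} {east : List (List String)} : (pvBMovesS M east).Nodup := by
  refine List.Nodup.sublist ?_ (pvAllMoves_nodup (cur := east) (mv := pvMvPairS M) (fun _ _ => rfl))
  unfold pvBMovesS
  exact pvFlatMap_sublist _ _ _ (fun ri _ => List.Sublist.map _ List.filter_sublist)

theorem pvPairsA_nodup {N : Nat} {g : List (List String)} {hs : PySem.Set (Nat × Nat)}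
    (hnd : hs.Nodup) : (pvPairsA N g hs).Nodup := by
  unfold pvPairsA
  refine List.Nodup.map_on ?_ (List.Nodup.filter _ hnd)
  intro x _ y _ h
  have := congrArg Prod.fst h
  simpa using this

theorem pvPairsAS_nodup {M : Nat} {g : List (List String)} {vs : PySem.Set (Nat × Nat)}
    (hnd : vs.Nodup) : (pvPairsAS M g vs).Nodup := by
  unfold pvPairsAS
  refine List.Nodup.map_on ?_ (List.Nodup.filter _ hnd)
  intro x _ y _ h
  have := congrArg Prod.fst h
  simpa using this

theorem pvMovesOK_of_MvE {M N : Nat} {g : List (List String)} (sh : pvSh M N g)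
    {l : List ((Nat × Nat) × (Nat × Nat))} (hnd : l.Nodup) (hm : ∀ e ∈ l, pvMvE N g e) :
    pvMovesOK ">" N g l := by
  have hshape : ∀ e ∈ l, e.2 = (e.1.1, (e.1.2 + 1) % N) ∧ pvCell g e.1 = ">" ∧ pvCell g e.2 = "." := by
    intro e he
    obtain ⟨i, j, rfl, h1, h2⟩ := hm e he
    exact ⟨rfl, h1, h2⟩
  refine ⟨?_, ?_, ?_⟩
  · refine List.Nodup.map_on ?_ hnd
    intro x hx y hy h
    have hx2 := (hshape x hx).1
    have hy2 := (hshape y hy).1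
    have : x.2 = y.2 := by rw [hx2, hy2, h]
    exact Prod.ext h this
  · refine List.Nodup.map_on ?_ hnd
    intro x hx y hy h
    obtain ⟨hx2, hxs, _⟩ := hshape x hx
    obtain ⟨hy2, hys, _⟩ := hshape y hy
    have hxr := pvCell_range sh hxs (by decide)
    have hyr := pvCell_range sh hys (by decide)
    rw [hx2, hy2] at h
    injection h with ha hb
    have h2 : x.1.2 = y.1.2 := pvModSucc_inj hxr.2 hyr.2 hb
    have : x.1 = y.1 := Prod.ext ha h2
    exact Prod.ext this (by rw [hx2, hy2, this])
  · intro m hmm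
    obtain ⟨h2, hs', ht'⟩ := hshape m hmm
    have hr1 := pvCell_range sh hs' (by decide)
    have hr2 := pvCell_range sh ht' (by decide)
    exact ⟨hs', ht', hr1.1, hr1.2, hr2.1, hr2.2⟩

theorem pvMovesOK_of_MvS {M N : Nat} {g : List (List String)} (sh : pvSh M N g)
    {l : List ((Nat × Nat) × (Nat × Nat))} (hnd : l.Nodup) (hm : ∀ e ∈ l, pvMvS M g e) :
    pvMovesOK "v" N g l := by
  have hshape : ∀ e ∈ l, e.2 = ((e.1.1 + 1) % M, e.1.2) ∧ pvCell g e.1 = "v" ∧ pvCell g e.2 = "." := by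
    intro e he
    obtain ⟨i, j, rfl, h1, h2⟩ := hm e he
    exact ⟨rfl, h1, h2⟩
  have hlen : g.length = M := sh.1
  refine ⟨?_, ?_, ?_⟩
  · refine List.Nodup.map_on ?_ hnd
    intro x hx y hy h
    have hx2 := (hshape x hx).1
    have hy2 := (hshape y hy).1
    have : x.2 = y.2 := by rw [hx2, hy2, h]
    exact Prod.ext h this
  · refine List.Nodup.map_on ?_ hnd
    intro x hx y hy h
    obtain ⟨hx2, hxs, _⟩ := hshape x hx
    obtain ⟨hy2, hys, _⟩ := hshape y hy
    have hxr := pvCell_range sh hxs (by decide)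
    have hyr := pvCell_range sh hys (by decide)
    rw [hx2, hy2] at h
    injection h with ha hb
    have h1 : x.1.1 = y.1.1 := pvModSucc_inj (by omega) (by omega) ha
    have : x.1 = y.1 := Prod.ext h1 hb
    exact Prod.ext this (by rw [hx2, hy2, this])
  · intro m hmm
    obtain ⟨h2, hs', ht'⟩ := hshape m hmm
    have hr1 := pvCell_range sh hs' (by decide)
    have hr2 := pvCell_range sh ht' (by decide)
    exact ⟨hs', ht', hr1.1, hr1.2, hr2.1, hr2.2⟩

theorem pvMap_mem_iff {α β : Type} {l1 l2 : List α} (h : ∀ e, e ∈ l1 ↔ e ∈ l2) (f : α → β)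
    (y : β) : y ∈ l1.map f ↔ y ∈ l2.map f := by
  constructor <;> rintro hm <;> obtain ⟨e, he, rfl⟩ := List.mem_map.mp hm
  · exact List.mem_map.mpr ⟨e, (h e).mp he, rfl⟩
  · exact List.mem_map.mpr ⟨e, (h e).mpr he, rfl⟩

theorem pvStep_generic {M N : Nat} {sym osym : String} (hsym : sym ≠ "." ∧ sym ≠ "")
    (hosym : osym ≠ sym ∧ osym ≠ ".")
    {g : List (List String)} (sh : pvSh M N g)
    {l1 l2 : List ((Nat × Nat) × (Nat × Nat))}
    (ok1 : pvMovesOK sym N g l1) (ok2 : pvMovesOK sym N g l2)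
    (hmm : ∀ e, e ∈ l1 ↔ e ∈ l2)
    {s os : PySem.Set (Nat × Nat)}
    (hsnd : s.Nodup) (hsi : ∀ p, p ∈ s ↔ pvCell g p = sym)
    (hos : ∀ p, p ∈ os ↔ pvCell g p = osym) :
    pvApply sym g l1 = pvApply sym g l2 ∧
    (l1 = [] ↔ l2 = []) ∧
    ((l1.foldl (fun s e => PySem.Set.add (pvSetRemove s e.1) e.2) s).Nodup ∧
      ∀ p, p ∈ l1.foldl (fun s e => PySem.Set.add (pvSetRemove s e.1) e.2) s ↔
        pvCell (pvApply sym g l1) p = sym) ∧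
    (∀ p, p ∈ os ↔ pvCell (pvApply sym g l1) p = osym) ∧
    pvSh M N (pvApply sym g l1) := by
  obtain ⟨nd1, nd2, hall⟩ := ok1
  have hsrc_cell : ∀ q, q ∈ l1.map Prod.fst → pvCell g q = sym := by
    intro q hq
    obtain ⟨e, he, rfl⟩ := List.mem_map.mp hq
    exact (hall e he).1
  have htgt_cell : ∀ q, q ∈ l1.map Prod.snd → pvCell g q = "." := by
    intro q hq
    obtain ⟨e, he, rfl⟩ := List.mem_map.mp hq
    exact (hall e he).2.1
  have hdisj : ∀ q, q ∈ l1.map Prod.fst → q ∉ l1.map Prod.snd := by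
    intro q h1 h2
    have := hsrc_cell q h1
    rw [htgt_cell q h2] at this
    exact hsym.1 this.symm
  have hchar := fun q => pvCell_pvApply hsym sh ⟨nd1, nd2, hall⟩ q
  refine ⟨?_, ?_, ?_, ?_, pvSh_pvApply sh sym l1⟩
  · refine pvGrid_ext (pvSh_pvApply sh sym l1) (pvSh_pvApply sh sym l2) ?_
    intro q
    rw [hchar q, pvCell_pvApply hsym sh ok2 q]
    have m1 := pvMap_mem_iff hmm Prod.fst q
    have m2 := pvMap_mem_iff hmm Prod.snd q
    by_cases h1 : q ∈ l1.map Prod.fst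
    · rw [if_pos h1, if_pos (m1.mp h1)]
    · rw [if_neg h1, if_neg (fun h => h1 (m1.mpr h))]
      by_cases h2 : q ∈ l1.map Prod.snd
      · rw [if_pos h2, if_pos (m2.mp h2)]
      · rw [if_neg h2, if_neg (fun h => h2 (m2.mpr h))]
  · constructor <;> intro h <;> rw [List.eq_nil_iff_forall_not_mem] at h ⊢ <;> intro e he
    · exact h e ((hmm e).mpr he)
    · exact h e ((hmm e).mp he)
  · have hfold := pvSetFold_char l1 s hsnd nd1 nd2
      (fun e he => (hsi e.1).mpr (hall e he).1)
      (fun e he hc => by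
        have := (hsi e.2).mp hc
        rw [(hall e he).2.1] at this
        exact hsym.1 this.symm)
    refine ⟨hfold.1, ?_⟩
    intro p
    rw [(hfold.2 p), hchar p]
    by_cases h1 : p ∈ l1.map Prod.fst
    · rw [if_pos h1]
      simp only [h1, not_true, and_false, false_or]
      constructor
      · intro h2
        exact (hdisj p h1 h2).elim
      · intro h
        exact absurd h.symm hsym.1
    · rw [if_neg h1]
      by_cases h2 : p ∈ l1.map Prod.snd
      · rw [if_pos h2]
        simp [h2]
      · rw [if_neg h2]
        simp only [h2, or_false]
        rw [hsi p]
        simp [h1]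
  · intro p
    rw [hos p, hchar p]
    by_cases h1 : p ∈ l1.map Prod.fst
    · rw [if_pos h1]
      have := hsrc_cell p h1
      constructor
      · intro h; rw [h] at this; exact absurd this hosym.1
      · intro h; exact absurd h.symm hosym.2
    · rw [if_neg h1]
      by_cases h2 : p ∈ l1.map Prod.snd
      · rw [if_pos h2]
        have := htgt_cell p h2
        constructor
        · intro h; rw [h] at this
          exact absurd this hosym.2
        · intro h; exact absurd h.symm hosym.1
      · rw [if_neg h2]

theorem pvIsEmpty_congr {α β : Type} {l1 : List α} {l2 : List β} (h : l1 = [] ↔ l2 = []) :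
    l1.isEmpty = l2.isEmpty := by
  by_cases h1 : l1 = []
  · simp [h1, h.mp h1]
  · have h2 := fun hh => h1 (h.mpr hh)
    rw [List.isEmpty_eq_false_iff.mpr h1, List.isEmpty_eq_false_iff.mpr h2]

theorem pvRun_eq (N M : Nat) : ∀ (fuel : Nat) (it : Int) (g : List (List String))
    (hs vs : PySem.Set (Nat × Nat)), pvSh M N g → hs.Nodup →
    (∀ p, p ∈ hs ↔ pvCell g p = ">") → vs.Nodup → (∀ p, p ∈ vs ↔ pvCell g p = "v") →
    pvRunA N M fuel it g hs vs = pvRunB N M fuel it g := by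
  intro fuel
  induction fuel with
  | zero => intros; rfl
  | succ fuel ih =>
    intro it g hs vs sh hnd hinv vnd vinv
    have okA := pvMovesOK_of_MvE sh (pvPairsA_nodup hnd) (fun e he => (pvMem_pairsA hinv e).mp he)
    have okB := pvMovesOK_of_MvE sh pvBMovesE_nodup (fun e he => (pvMem_bMovesE sh e).mp he)
    have hmmE : ∀ e, e ∈ pvPairsA N g hs ↔ e ∈ pvBMovesE N g :=
      fun e => (pvMem_pairsA hinv e).trans (pvMem_bMovesE sh e).symm
    obtain ⟨geq, hemp, ⟨hsnd', hsinv'⟩, hvinv', sh'⟩ :=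
      pvStep_generic (by decide) (by decide) sh okA okB hmmE hnd hinv vinv
    have okAS := pvMovesOK_of_MvS sh' (pvPairsAS_nodup vnd) (fun e he => (pvMem_pairsAS hvinv' e).mp he)
    have okBS := pvMovesOK_of_MvS sh' pvBMovesS_nodup (fun e he => (pvMem_bMovesS sh' e).mp he)
    have hmmS : ∀ e, e ∈ pvPairsAS M (pvApply ">" g (pvPairsA N g hs)) vs ↔
        e ∈ pvBMovesS M (pvApply ">" g (pvPairsA N g hs)) :=
      fun e => (pvMem_pairsAS hvinv' e).trans (pvMem_bMovesS sh' e).symm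
    obtain ⟨geqS, hempS, ⟨vsnd', vsinv'⟩, hsinv'', sh''⟩ :=
      pvStep_generic (by decide) (by decide) sh' okAS okBS hmmS vnd hvinv' hsinv'
    show (if !(pvCollectE N g hs).isEmpty ||
            !(pvCollectS M (pvApplyE (g, hs) (pvCollectE N g hs)).1 vs).isEmpty then
          pvRunA N M fuel (it + 1)
            (pvApplyS ((pvApplyE (g, hs) (pvCollectE N g hs)).1, vs)
              (pvCollectS M (pvApplyE (g, hs) (pvCollectE N g hs)).1 vs)).1
            (pvApplyE (g, hs) (pvCollectE N g hs)).2
            (pvApplyS ((pvApplyE (g, hs) (pvCollectE N g hs)).1, vs)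
              (pvCollectS M (pvApplyE (g, hs) (pvCollectE N g hs)).1 vs)).2
        else it + 1)
        = (if (pvSouthPhase M (pvEastPhase N g).1 (pvEastPhase N g).2).2 then
            pvRunB N M fuel (it + 1) (pvSouthPhase M (pvEastPhase N g).1 (pvEastPhase N g).2).1
          else it + 1)
    rw [pvApplyE_eq, pvCollectE_pairs, pvEastPhase_eq]
    rw [← geq, pvApplyS_eq, pvCollectS_pairs, pvSouthPhase_eq]
    rw [← geqS]
    have hflagE : (pvCollectE N g hs).isEmpty = (pvBMovesE N g).isEmpty := by
      refine pvIsEmpty_congr (Iff.trans ?_ hemp)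
      rw [pvCollectE_eq]
      unfold pvPairsA
      simp [List.map_eq_nil_iff]
    have hflagS : (pvCollectS M (pvApply ">" g (pvPairsA N g hs)) vs).isEmpty
        = (pvBMovesS M (pvApply ">" g (pvPairsA N g hs))).isEmpty := by
      refine pvIsEmpty_congr (Iff.trans ?_ hempS)
      rw [pvCollectS_eq]
      unfold pvPairsAS
      simp [List.map_eq_nil_iff]
    rw [hflagE, hflagS]
    split
    · exact ih (it + 1) _ _ _ sh'' hsnd' hsinv'' vsnd' vsinv'
    · rfl

theorem pvMem_posList {M N : Nat} {grid : List (List String)} (sh : pvSh M N grid)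
    {sym : String} (hsym : sym ≠ "") (p : Nat × Nat) :
    p ∈ pvPosList grid sym ↔ pvCell grid p = sym := by
  unfold pvPosList
  rw [List.mem_flatMap]
  constructor
  · rintro ⟨ri, hri, hmem⟩
    obtain ⟨hrow, hcell⟩ := pvRow_of_zipIdx hri
    obtain ⟨cj, hcj, rfl⟩ := List.mem_map.mp hmem
    obtain ⟨hcjmem, hcond⟩ := List.mem_filter.mp hcj
    have hc' : cj.1 = sym := by simpa using hcond
    rw [hcell cj.2]
    obtain ⟨c, j⟩ := cj
    have := List.mk_mem_zipIdx_iff_getElem?.mp hcjmem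
    simp only [List.getD_eq_getElem?_getD, this]
    exact hc'
  · intro hp
    obtain ⟨i, j⟩ := p
    have hr1 := pvCell_range sh hp hsym
    have hi : i < grid.length := hr1.1
    have hrowlen : grid[i].length = N := sh.2 i hi
    have hj : j < grid[i].length := by rw [hrowlen]; exact hr1.2
    have hcellij : pvCell grid (i, j) = grid[i][j] := by
      simp only [pvCell, List.getD_eq_getElem?_getD, List.getElem?_eq_getElem hi, Option.getD_some,
        List.getElem?_eq_getElem hj]
    refine ⟨(grid[i], i), List.mk_mem_zipIdx_iff_getElem?.mpr (List.getElem?_eq_getElem hi), ?_⟩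
    rw [List.mem_map]
    refine ⟨(grid[i][j], j), ?_, rfl⟩
    rw [List.mem_filter]
    refine ⟨List.mk_mem_zipIdx_iff_getElem?.mpr (List.getElem?_eq_getElem hj), ?_⟩
    rw [← hcellij, hp]
    simp

theorem pvMem_row_of_zipIdx {row : List String} {cj : String × Nat} (h : cj ∈ row.zipIdx) :
    cj.1 ∈ row := by
  obtain ⟨c, j⟩ := cj
  have := List.mk_mem_zipIdx_iff_getElem?.mp h
  exact List.mem_of_getElem? this

theorem pvPosList_eq_nil {grid : List (List String)} {sym : String}
    (h : ∀ row ∈ grid, sym ∉ row) : pvPosList grid sym = [] := by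
  rw [List.eq_nil_iff_forall_not_mem]
  intro p hp
  obtain ⟨ri, hri, hmem⟩ := List.mem_flatMap.mp hp
  obtain ⟨cj, hcj, _⟩ := List.mem_map.mp hmem
  obtain ⟨hcjmem, hcond⟩ := List.mem_filter.mp hcj
  have hc' : cj.1 = sym := by simpa using hcond
  have hrow : ri.1 ∈ grid := by
    obtain ⟨row, i⟩ := ri
    exact List.mem_of_getElem? (List.mk_mem_zipIdx_iff_getElem?.mp hri)
  exact h ri.1 hrow (hc' ▸ pvMem_row_of_zipIdx hcjmem)

theorem pvBMovesE_eq_nil {N : Nat} {grid : List (List String)}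
    (h : ∀ row ∈ grid, ">" ∉ row) : pvBMovesE N grid = [] := by
  rw [List.eq_nil_iff_forall_not_mem]
  intro e he
  obtain ⟨ri, hri, hmem⟩ := List.mem_flatMap.mp he
  obtain ⟨cj, hcj, _⟩ := List.mem_map.mp hmem
  obtain ⟨hcjmem, hcond⟩ := List.mem_filter.mp hcj
  have hc' : cj.1 = ">" := by
    have := Bool.and_eq_true_iff.mp hcond
    simpa using this.1
  have hrow : ri.1 ∈ grid := by
    obtain ⟨row, i⟩ := ri
    exact List.mem_of_getElem? (List.mk_mem_zipIdx_iff_getElem?.mp hri)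
  exact h ri.1 hrow (hc' ▸ pvMem_row_of_zipIdx hcjmem)

theorem pvBMovesS_eq_nil {M : Nat} {grid : List (List String)}
    (h : ∀ row ∈ grid, "v" ∉ row) : pvBMovesS M grid = [] := by
  rw [List.eq_nil_iff_forall_not_mem]
  intro e he
  obtain ⟨ri, hri, hmem⟩ := List.mem_flatMap.mp he
  obtain ⟨cj, hcj, _⟩ := List.mem_map.mp hmem
  obtain ⟨hcjmem, hcond⟩ := List.mem_filter.mp hcj
  have hc' : cj.1 = "v" := by
    have := Bool.and_eq_true_iff.mp hcond
    simpa using this.1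
  have hrow : ri.1 ∈ grid := by
    obtain ⟨row, i⟩ := ri
    exact List.mem_of_getElem? (List.mk_mem_zipIdx_iff_getElem?.mp hri)
  exact h ri.1 hrow (hc' ▸ pvMem_row_of_zipIdx hcjmem)

theorem pvRunA_nil (N M : Nat) (K : Nat) (it : Int) (g : List (List String)) :
    pvRunA N M (K + 1) it g (PySem.Set.ofList []) (PySem.Set.ofList []) = it + 1 := rfl

theorem pvRunB_nil {N M : Nat} {grid : List (List String)}
    (h1 : ∀ row ∈ grid, ">" ∉ row) (h2 : ∀ row ∈ grid, "v" ∉ row) (K : Nat) (it : Int) :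
    pvRunB N M (K + 1) it grid = it + 1 := by
  show (if (pvSouthPhase M (pvEastPhase N grid).1 (pvEastPhase N grid).2).2 then
      pvRunB N M K (it + 1) (pvSouthPhase M (pvEastPhase N grid).1 (pvEastPhase N grid).2).1
    else it + 1) = it + 1
  rw [pvEastPhase_eq, pvBMovesE_eq_nil h1]
  have heast : pvApply ">" grid ([] : List ((Nat × Nat) × (Nat × Nat))) = grid := rfl
  rw [heast]
  rw [pvSouthPhase_eq, pvBMovesS_eq_nil h2]
  rfl

theorem solve_eq_alt (grid : List (List String)) (hpre : Pre_solve grid) :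
    solve grid = solve_alt grid := by
  obtain ⟨hne, hcase⟩ := hpre
  rcases hcase with hnoc | hrect
  · have hpos1 : pvPosList grid ">" = [] := pvPosList_eq_nil (fun r hr => (hnoc r hr).1)
    have hpos2 : pvPosList grid "v" = [] := pvPosList_eq_nil (fun r hr => (hnoc r hr).2)
    have hpos : 0 < pvFuel grid := Nat.lt_of_lt_of_le (by norm_num) (Nat.le_add_left 2 _)
    have hf : pvFuel grid = (pvFuel grid - 1) + 1 := by omega
    unfold solve solve_alt
    rw [hpos1, hpos2, hf, pvRunA_nil,
      pvRunB_nil (fun r hr => (hnoc r hr).1) (fun r hr => (hnoc r hr).2)]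
  · have sh : pvSh grid.length (grid.headD []).length grid :=
      ⟨rfl, fun i h => hrect grid[i] (List.getElem_mem h)⟩
    unfold solve solve_alt
    exact pvRun_eq _ _ (pvFuel grid) 0 grid _ _ sh
      (PySem.Set.nodup_ofList _)
      (fun p => (PySem.Set.mem_ofList _ p).trans (pvMem_posList sh (by decide) p))
      (PySem.Set.nodup_ofList _)
      (fun p => (PySem.Set.mem_ofList _ p).trans (pvMem_posList sh (by decide) p))

-- ===== VERDICT (by name: the statement is the Claim_ definition above) =====
theorem solve_spec : Claim_equal_solve := by
  intro grid _ hpre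
  exact solve_eq_alt grid hpre
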